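-- pv_equiv track=rewrite | github.com/LiuQH-lab/FindSpinGroup | src/findspingroup/structure/group.py | _calculate_specificity_score
-- ===== SOURCE A (Python) =====
-- def _calculate_specificity_score(parsed_pattern):
--     score = 0
--     vars_seen = set()
--
--     for p in parsed_pattern:
--         if p['type'] == 'fixed':
--             score += 10
--         elif p['type'] == 'var':
--             if p['name'] in vars_seen:
--                 score += 5
--             vars_seen.add(p['name'])
--     return score
-- ===== SOURCE B (Python) =====
-- def _calculate_specificity_score(parsed_pattern):
--     types = [p['type'] for p in parsed_pattern]
--     names = sorted(p['name'] for p in parsed_pattern if p['type'] == 'var')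
--     dup = sum(1 for x, y in zip(names, names[1:]) if x == y)
--     return 10 * types.count('fixed') + 5 * dup
-- ===== Notes on version B (the rewrite author's own statement) =====
-- stated objective: alternative
-- what changed: B replaces A's single pass with a running seen-set by staged passes: it collects the var names, sorts them so equal names become adjacent, counts adjacent equal pairs (each repeated name contributes exactly its extra occurrences), and combines with list.count of 'fixed' types in a closed form.
import Mathlib
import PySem

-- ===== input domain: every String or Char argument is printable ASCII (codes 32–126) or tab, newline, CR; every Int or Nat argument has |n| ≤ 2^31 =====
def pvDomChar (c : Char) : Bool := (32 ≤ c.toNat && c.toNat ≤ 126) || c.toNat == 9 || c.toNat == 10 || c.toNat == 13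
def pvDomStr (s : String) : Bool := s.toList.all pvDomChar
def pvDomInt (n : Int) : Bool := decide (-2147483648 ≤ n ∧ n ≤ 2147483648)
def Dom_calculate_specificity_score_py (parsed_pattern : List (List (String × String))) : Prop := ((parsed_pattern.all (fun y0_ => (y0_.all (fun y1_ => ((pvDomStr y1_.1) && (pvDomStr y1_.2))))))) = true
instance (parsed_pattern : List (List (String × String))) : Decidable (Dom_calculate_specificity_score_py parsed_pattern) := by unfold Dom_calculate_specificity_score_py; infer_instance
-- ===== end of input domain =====

-- B replaces A's one-pass seen-set scoring by staged passes: collect var names, sort them so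
-- equal names are adjacent, count adjacent equal pairs, combine with list.count of 'fixed';
-- objective: alternative.

-- shared helper: p[k] for the token dict p (none where Python would raise KeyError; excluded by Pre_)
def pvLook (p : List (String × String)) (k : String) : Option String :=
  (PySem.Dict.mk p).get? k

-- ===== PORT A =====
def calculate_specificity_score_py (parsed_pattern : List (List (String × String))) : Int :=
  (parsed_pattern.foldl
    (fun (st : Int × PySem.Set String) p =>
      if (pvLook p "type").getD "" == "fixed" then (st.1 + 10, st.2)
      else if (pvLook p "type").getD "" == "var" then
        let n := (pvLook p "name").getD ""
        (if PySem.Set.contains st.2 n then st.1 + 5 else st.1, PySem.Set.add st.2 n)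
      else st)
    (0, PySem.Set.empty)).1

-- ===== PORT B =====
def calculate_specificity_score_py_alt (parsed_pattern : List (List (String × String))) : Int :=
  let types := parsed_pattern.map (fun p => (pvLook p "type").getD "")
  let names := PySem.List.sorted
    ((parsed_pattern.filter (fun p => (pvLook p "type").getD "" == "var")).map
      (fun p => (pvLook p "name").getD ""))
    (fun x => x) false
  let dup : Int :=
    ((names.zip (PySem.List.slice names (some 1) none)).filter (fun xy => xy.1 == xy.2)).length
  10 * (PySem.List.count types "fixed" : Int) + 5 * dup

-- ===== PRECONDITION & SPEC =====
-- Pre_ excludes exactly the inputs where Python raises KeyError: a token without a 'type'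
-- key, or a 'var' token without a 'name' key.
def Pre_calculate_specificity_score_py (parsed_pattern : List (List (String × String))) : Prop :=
  ∀ p ∈ parsed_pattern, (pvLook p "type").isSome ∧
    (pvLook p "type" = some "var" → (pvLook p "name").isSome)
instance (parsed_pattern : List (List (String × String))) : Decidable (Pre_calculate_specificity_score_py parsed_pattern) := by unfold Pre_calculate_specificity_score_py; infer_instance
def pvWitness_calculate_specificity_score_py : (List (List (String × String))) :=
  [[("type", "fixed")], [("type", "var"), ("name", "a")], [("type", "var"), ("name", "a")]]

def Spec_calculate_specificity_score_py (parsed_pattern : List (List (String × String))) (out : Int) : Prop := out = calculate_specificity_score_py_alt parsed_pattern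
instance (parsed_pattern : List (List (String × String))) (out : Int) : Decidable (Spec_calculate_specificity_score_py parsed_pattern out) := by unfold Spec_calculate_specificity_score_py; infer_instance

-- ===== CLAIM (what is proved, stated in full; the proofs are below) =====
def Claim_equal_calculate_specificity_score_py : Prop := ∀ (parsed_pattern : List (List (String × String))), Dom_calculate_specificity_score_py parsed_pattern → Pre_calculate_specificity_score_py parsed_pattern → Spec_calculate_specificity_score_py parsed_pattern (calculate_specificity_score_py parsed_pattern)

-- ===== LEMMAS AND PROOFS =====

-- A's loop body, named for the invariant proof
def pvStepA (st : Int × PySem.Set String) (p : List (String × String)) : Int × PySem.Set String :=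
  if (pvLook p "type").getD "" == "fixed" then (st.1 + 10, st.2)
  else if (pvLook p "type").getD "" == "var" then
    let n := (pvLook p "name").getD ""
    (if PySem.Set.contains st.2 n then st.1 + 5 else st.1, PySem.Set.add st.2 n)
  else st

-- the var names of the pattern, in order
def pvNames (l : List (List (String × String))) : List String :=
  (l.filter (fun p => (pvLook p "type").getD "" == "var")).map (fun p => (pvLook p "name").getD "")

-- loop invariant for A: the score is 10 per 'fixed' token plus 5 per var name already in the
-- growing seen-set, expressed through the foldl of Set.add
theorem pv_invA (l : List (List (String × String))) :
    ∀ (s : Int) (seen : PySem.Set String),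
      (l.foldl pvStepA (s, seen)).1
        = s + 10 * (((l.map (fun p => (pvLook p "type").getD "")).count "fixed" : Int))
            + 5 * (((pvNames l).length : Int) + (seen.length : Int)
                   - (((pvNames l).foldl PySem.Set.add seen).length : Int)) := by
  induction l with
  | nil => intro s seen; simp [pvNames]
  | cons p l ih =>
    intro s seen
    simp only [List.foldl_cons, List.map_cons]
    by_cases hf : ((pvLook p "type").getD "" == "fixed") = true
    · have hfe : (pvLook p "type").getD "" = "fixed" := eq_of_beq hf
      have hns : pvNames (p :: l) = pvNames l := by simp [pvNames, hfe]
      have hst : pvStepA (s, seen) p = (s + 10, seen) := by simp [pvStepA, hf]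
      rw [hst, hns, ih (s + 10) seen]
      simp [hfe]
      ring
    · have hcount : ((pvLook p "type").getD "" :: l.map (fun p => (pvLook p "type").getD "")).count "fixed"
          = (l.map (fun p => (pvLook p "type").getD "")).count "fixed" := by
        rw [List.count_cons]
        simp [show ¬((pvLook p "type").getD "" == "fixed") = true from hf]
      by_cases hv : ((pvLook p "type").getD "" == "var") = true
      · have hns : pvNames (p :: l) = (pvLook p "name").getD "" :: pvNames l := by
          simp [pvNames, hv]
        by_cases hm : ((pvLook p "name").getD "") ∈ seen
        · have ha : PySem.Set.add seen ((pvLook p "name").getD "") = seen :=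
            PySem.Set.add_of_mem hm
          have hst : pvStepA (s, seen) p = (s + 5, seen) := by
            simp [pvStepA, hf, hv, hm]
          rw [hst, ih (s + 5) seen, hcount, hns]
          simp only [List.foldl_cons, ha, List.length_cons]
          push_cast
          ring
        · have ha : PySem.Set.add seen ((pvLook p "name").getD "")
              = seen ++ [(pvLook p "name").getD ""] :=
            PySem.Set.add_of_not_mem hm
          have hst : pvStepA (s, seen) p = (s, seen ++ [(pvLook p "name").getD ""]) := by
            simp [pvStepA, hf, hv, hm]
          rw [hst, ih s (seen ++ [(pvLook p "name").getD ""]), hcount, hns]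
          simp only [List.foldl_cons, ha, List.length_cons, List.length_append, List.length_nil]
          push_cast
          ring
      · have hns : pvNames (p :: l) = pvNames l := by simp [pvNames, hv]
        have hst : pvStepA (s, seen) p = (s, seen) := by simp [pvStepA, hf, hv]
        rw [hst, hns, ih s seen, hcount]

-- in a ≤-sorted list, (number of adjacent equal pairs) + (number of distinct values) = length
theorem pv_adj (m : List String) (h : m.Pairwise (· ≤ ·)) :
    ((m.zip (m.drop 1)).filter (fun xy => xy.1 == xy.2)).length + m.toFinset.card
      = m.length := by
  induction m with
  | nil => simp
  | cons a t ih =>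
    cases t with
    | nil => simp
    | cons b t' =>
      have h' : (b :: t').Pairwise (· ≤ ·) := h.tail
      have hab : a ≤ b := (List.pairwise_cons.mp h).1 b (by simp)
      have ihv := ih h'
      by_cases hab' : a = b
      · subst hab'
        have hz : ((a :: a :: t').zip ((a :: a :: t').drop 1)).filter (fun xy => xy.1 == xy.2)
            = (a, a) :: ((a :: t').zip ((a :: t').drop 1)).filter (fun xy => xy.1 == xy.2) := by
          simp
        have hfs : (a :: a :: t').toFinset.card = (a :: t').toFinset.card := by simp
        rw [hz, hfs, List.length_cons, List.length_cons]
        have hl : (a :: t').length = t'.length + 1 := List.length_cons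
        omega
      · have hnot : a ∉ (b :: t') := by
          intro hmem
          rcases List.mem_cons.mp hmem with h1 | h2
          · exact hab' h1
          · exact hab' (le_antisymm hab ((List.pairwise_cons.mp h').1 a h2))
        have hfin : (a :: b :: t').toFinset.card = (b :: t').toFinset.card + 1 := by
          rw [List.toFinset_cons, Finset.card_insert_of_notMem (by simpa using hnot)]
        have hz : ((a :: b :: t').zip ((a :: b :: t').drop 1)).filter (fun xy => xy.1 == xy.2)
            = ((b :: t').zip ((b :: t').drop 1)).filter (fun xy => xy.1 == xy.2) := by
          simp [hab']
        rw [hz, hfin, List.length_cons]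
        have hl : (b :: t').length = t'.length + 1 := List.length_cons
        omega

-- a duplicate-free list has toFinset.card = length; applied to Set.ofList
theorem pv_ofList_len (ns : List String) :
    ((PySem.Set.ofList ns).length : Int) = (ns.toFinset.card : Int) := by
  have hnd : (PySem.Set.ofList ns).Nodup := PySem.Set.nodup_ofList ns
  have hfs : (PySem.Set.ofList ns).toFinset = ns.toFinset := by
    ext x; simp [List.mem_toFinset, PySem.Set.mem_ofList]
  rw [← hfs, List.toFinset_card_of_nodup hnd]

-- ===== VERDICT (by name: the statement is the Claim_ definition above) =====
theorem calculate_specificity_score_py_spec : Claim_equal_calculate_specificity_score_py := by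
  intro pp _ _
  unfold Spec_calculate_specificity_score_py
  have ha : calculate_specificity_score_py pp = (pp.foldl pvStepA (0, PySem.Set.empty)).1 := rfl
  rw [ha, pv_invA pp 0 PySem.Set.empty]
  rw [show (pvNames pp).foldl PySem.Set.add PySem.Set.empty = PySem.Set.ofList (pvNames pp) from
    (PySem.Set.ofList_eq_foldl _).symm]
  rw [pv_ofList_len]
  have hb : calculate_specificity_score_py_alt pp
      = 10 * ((pp.map (fun p => (pvLook p "type").getD "")).count "fixed" : Int)
        + 5 * ((((PySem.List.sorted (pvNames pp) (fun x => x) false).zip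
                  ((PySem.List.sorted (pvNames pp) (fun x => x) false).drop 1)).filter
                  (fun xy => xy.1 == xy.2)).length : Int) := by
    simp [calculate_specificity_score_py_alt, PySem.List.count_eq, PySem.List.slice_from_one,
      List.drop_one, pvNames]
  rw [hb]
  have hpw : (PySem.List.sorted (pvNames pp) (fun x => x) false).Pairwise (· ≤ ·) := by
    simpa using PySem.List.sorted_pairwise (xs := pvNames pp) (key := fun x => x)
  have hperm : (PySem.List.sorted (pvNames pp) (fun x => x) false).Perm (pvNames pp) :=
    PySem.List.sorted_perm _ _ _
  have hadj := pv_adj _ hpw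
  rw [List.toFinset_eq_of_perm _ _ hperm, hperm.length_eq] at hadj
  have hemp : ((PySem.Set.empty : PySem.Set String).length : Int) = 0 := rfl
  rw [hemp]
  omega
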